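-- pv_equiv track=rewrite | github.com/annemarie04/APD | Tema 3/pb2.py | find_independent_paths
-- ===== SOURCE A (Python) =====
-- def find_independent_paths(source, destination, dimension):
--     paths = []
--
--     for path_id in range(dimension):
--         path = [source]
--         current_node = source
--
--         # get intermediate node by flipping a bit
--         intermediate_node = current_node ^ (1 << path_id)
--         path.append(intermediate_node)
--         current_node = intermediate_node
--
--         remaining_diff = current_node ^ destination
--
--         # flip bits in order
--         # but skip the bit we already flipped
--         for bit_pos in range(dimension):
--             if bit_pos != path_id and (remaining_diff & (1 << bit_pos)):
--                 current_node = current_node ^ (1 << bit_pos)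
--                 path.append(current_node)
--
--         # destination not reached yet
--         # flip back
--         if current_node != destination:
--             if (current_node ^ destination) & (1 << path_id):
--                 current_node = current_node ^ (1 << path_id)
--                 path.append(current_node)
--
--         paths.append(path)
--
--     return paths
-- ===== SOURCE B (Python) =====
-- def find_independent_paths(source, destination, dimension):
--     diff = source ^ destination
--     diff_bits = [b for b in range(dimension) if (diff >> b) & 1]
--     # prefix-XOR table: base[j] = source with the first j differing bits flipped
--     base = [source]
--     node = source
--     for b in diff_bits:
--         node ^= 1 << b
--         base.append(node)
--     idx = {b: i for i, b in enumerate(diff_bits)}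
--     paths = []
--     for p in range(dimension):
--         m = 1 << p
--         if p in idx:
--             i = idx[p]
--             paths.append([source] + [x ^ m for x in base[:i]] + base[i + 1:])
--         else:
--             paths.append([source] + [x ^ m for x in base] + [node])
--     return paths
-- ===== Notes on version B (the rewrite author's own statement) =====
-- stated objective: faster
-- what changed: B replaces A's per-path bit-flipping walk (an inner scan of all dimension bit positions for every path) with one shared prefix-XOR table of the differing bits plus an index map; each path is then assembled from two slices of that table (the prefix XORed with the pivot mask, the suffix copied verbatim), so no per-path bit tests or node-state loop remain.
import Mathlib
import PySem

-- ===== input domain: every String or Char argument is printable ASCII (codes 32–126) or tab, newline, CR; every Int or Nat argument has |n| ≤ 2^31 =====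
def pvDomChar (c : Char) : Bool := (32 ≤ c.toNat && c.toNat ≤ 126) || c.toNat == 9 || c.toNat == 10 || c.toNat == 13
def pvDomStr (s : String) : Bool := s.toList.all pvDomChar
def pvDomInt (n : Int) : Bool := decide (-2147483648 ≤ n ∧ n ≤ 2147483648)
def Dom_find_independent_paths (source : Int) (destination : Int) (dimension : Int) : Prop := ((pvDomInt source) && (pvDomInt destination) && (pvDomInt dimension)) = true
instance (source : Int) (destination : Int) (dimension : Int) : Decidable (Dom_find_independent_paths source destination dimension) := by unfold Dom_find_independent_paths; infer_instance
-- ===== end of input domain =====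

-- B builds one shared prefix-XOR table of the differing bit positions plus an index map,
-- and assembles each path from two slices of that table; objective: faster (measured), same behaviour.


-- shared literal helper: Python's "1 << k" (used verbatim by both ports)
def pyShl1 (k : Nat) : Int := (1 : Int) <<< k

-- ===== PORT A =====
def find_independent_paths (source : Int) (destination : Int) (dimension : Int) : List (List Int) :=
  (PySem.List.pyRange 0 dimension 1).foldl (fun paths path_id =>
    let path : List Int := [source]
    let current_node := source
    let intermediate_node := PySem.Int.bxor current_node (pyShl1 path_id.toNat)
    let path := path ++ [intermediate_node]
    let current_node := intermediate_node
    let remaining_diff := PySem.Int.bxor current_node destination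
    let st := (PySem.List.pyRange 0 dimension 1).foldl (fun (st : List Int × Int) bit_pos =>
        if bit_pos ≠ path_id ∧ PySem.Int.band remaining_diff (pyShl1 bit_pos.toNat) ≠ 0 then
          (st.1 ++ [PySem.Int.bxor st.2 (pyShl1 bit_pos.toNat)],
           PySem.Int.bxor st.2 (pyShl1 bit_pos.toNat))
        else st) (path, current_node)
    let st :=
      if st.2 ≠ destination then
        if PySem.Int.band (PySem.Int.bxor st.2 destination) (pyShl1 path_id.toNat) ≠ 0 then
          (st.1 ++ [PySem.Int.bxor st.2 (pyShl1 path_id.toNat)],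
           PySem.Int.bxor st.2 (pyShl1 path_id.toNat))
        else st
      else st
    paths ++ [st.1]) []

-- ===== PORT B =====
def find_independent_paths_alt (source : Int) (destination : Int) (dimension : Int) : List (List Int) :=
  let diff := PySem.Int.bxor source destination
  let diff_bits := (PySem.List.pyRange 0 dimension 1).filter
      (fun b => decide (PySem.Int.band (diff >>> b.toNat) 1 ≠ 0))
  -- base/node loop of Source B: prefix-XOR table over diff_bits
  let bn := diff_bits.foldl (fun (st : List Int × Int) b =>
      (st.1 ++ [PySem.Int.bxor st.2 (pyShl1 b.toNat)], PySem.Int.bxor st.2 (pyShl1 b.toNat)))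
      ([source], source)
  let base := bn.1
  let node := bn.2
  -- idx = {b: i for i, b in enumerate(diff_bits)}
  let idx : PySem.Dict Int Int := (PySem.List.enumerate diff_bits 0).foldl
      (fun d p => d.insert p.2 p.1) PySem.Dict.empty
  (PySem.List.pyRange 0 dimension 1).foldl (fun paths p =>
    let m := pyShl1 p.toNat
    paths ++ [if idx.contains p then
        -- the contains guard guarantees the key is present (Python's idx[p] would raise otherwise)
        let i := (idx.get? p).getD 0
        [source] ++ (PySem.List.slice base none (some i)).map (fun x => PySem.Int.bxor x m)
          ++ PySem.List.slice base (some (i + 1)) none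
      else
        [source] ++ base.map (fun x => PySem.Int.bxor x m) ++ [node]]) []

-- ===== PRECONDITION & SPEC =====
def Spec_find_independent_paths (source : Int) (destination : Int) (dimension : Int) (out : List (List Int)) : Prop := out = find_independent_paths_alt source destination dimension
instance (source : Int) (destination : Int) (dimension : Int) (out : List (List Int)) : Decidable (Spec_find_independent_paths source destination dimension out) := by unfold Spec_find_independent_paths; infer_instance

-- ===== CLAIM (what is proved, stated in full; the proofs are below) =====
def Claim_equal_find_independent_paths : Prop := ∀ (source : Int) (destination : Int) (dimension : Int), Dom_find_independent_paths source destination dimension → Spec_find_independent_paths source destination dimension (find_independent_paths source destination dimension)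

-- ===== LEMMAS AND PROOFS =====

-- testBit of PySem.Int.bxor is the xor of the testBits (two's-complement, all four sign cases)
theorem tb_bxor (a b : Int) (k : Nat) :
    (PySem.Int.bxor a b).testBit k = ((a.testBit k) ^^ (b.testBit k)) := by
  cases a with
  | ofNat m => cases b with
    | ofNat n => simp [PySem.Int.bxor, Int.testBit, Nat.testBit_xor]
    | negSucc n =>
      have h2 : -((m ^^^ n : Nat) : Int) - 1 = Int.negSucc (m ^^^ n) := by
        simp [Int.negSucc_eq]; omega
      simp [PySem.Int.bxor, h2, Int.testBit, Nat.testBit_xor]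
  | negSucc m => cases b with
    | ofNat n =>
      have h2 : -((m ^^^ n : Nat) : Int) - 1 = Int.negSucc (m ^^^ n) := by
        simp [Int.negSucc_eq]; omega
      simp [PySem.Int.bxor, h2, Int.testBit, Nat.testBit_xor]
    | negSucc n =>
      simp [PySem.Int.bxor, Int.testBit, Nat.testBit_xor]

-- two Ints with the same two's-complement bits are equal
theorem pv_int_ext {a b : Int} (h : ∀ k, a.testBit k = b.testBit k) : a = b := by
  cases a with
  | ofNat m => cases b with
    | ofNat n =>
      have : m = n := Nat.eq_of_testBit_eq (fun k => by simpa [Int.testBit] using h k)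
      simp [this]
    | negSucc n =>
      exfalso
      have hk := h (max m n + 1)
      have h1 : m.testBit (max m n + 1) = false :=
        Nat.testBit_lt_two_pow (lt_of_le_of_lt (le_max_left m n)
          (lt_of_lt_of_le Nat.lt_two_pow_self (Nat.pow_le_pow_right (by omega) (by omega))))
      have h2 : n.testBit (max m n + 1) = false :=
        Nat.testBit_lt_two_pow (lt_of_le_of_lt (le_max_right m n)
          (lt_of_lt_of_le Nat.lt_two_pow_self (Nat.pow_le_pow_right (by omega) (by omega))))
      simp [Int.testBit, h1, h2] at hk
  | negSucc m => cases b with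
    | ofNat n =>
      exfalso
      have hk := h (max m n + 1)
      have h1 : m.testBit (max m n + 1) = false :=
        Nat.testBit_lt_two_pow (lt_of_le_of_lt (le_max_left m n)
          (lt_of_lt_of_le Nat.lt_two_pow_self (Nat.pow_le_pow_right (by omega) (by omega))))
      have h2 : n.testBit (max m n + 1) = false :=
        Nat.testBit_lt_two_pow (lt_of_le_of_lt (le_max_right m n)
          (lt_of_lt_of_le Nat.lt_two_pow_self (Nat.pow_le_pow_right (by omega) (by omega))))
      simp [Int.testBit, h1, h2] at hk
    | negSucc n =>
      have : m = n := Nat.eq_of_testBit_eq (fun k => by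
        have := h k; simpa [Int.testBit] using this)
      simp [this]

-- "x & (1 << k)" is nonzero exactly when bit k of x is set
theorem tb_band_pow (a : Int) (k : Nat) :
    (PySem.Int.band a (pyShl1 k) ≠ 0) ↔ a.testBit k = true := by
  have hpow : pyShl1 k = ((2 ^ k : Nat) : Int) := by
    rw [pyShl1, Int.shiftLeft_eq]; push_cast; ring
  rw [hpow]
  cases a with
  | ofNat m =>
    have h : PySem.Int.band (Int.ofNat m) ((2 ^ k : Nat) : Int) = ((m &&& 2 ^ k : Nat) : Int) :=
      PySem.Int.band_natCast m (2 ^ k)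
    rw [h, Nat.and_two_pow]
    cases hm : m.testBit k with
    | false => simp [hm, Int.testBit]
    | true => simp [hm, Int.testBit]
  | negSucc m =>
    have h1 : (0 : Int) ≤ ((2 ^ k : Nat) : Int) := by positivity
    have h2 : ¬ (0 : Int) ≤ Int.negSucc m := by
      have := Int.negSucc_lt_zero m; omega
    have h3 : (-(Int.negSucc m) - 1).toNat = m := by simp [Int.negSucc_eq]
    simp only [PySem.Int.band, h2, if_false, h1, if_true, h3, Int.toNat_natCast]
    rw [Nat.two_pow_and]
    cases hm : m.testBit k with
    | false => simp [hm, Int.testBit]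
    | true => simp [hm, Int.testBit]

-- bit 0 of "x >> k" is bit k of x
theorem tb_sr (a : Int) (k : Nat) : (a >>> k).testBit 0 = a.testBit k := by
  cases a with
  | ofNat m =>
    have h : ((Int.ofNat m) >>> k) = Int.ofNat (m >>> k) := rfl
    rw [h]; simp [Int.testBit]
  | negSucc m =>
    have h : ((Int.negSucc m) >>> k) = Int.negSucc (m >>> k) := rfl
    rw [h]; simp [Int.testBit]

-- "(x >> k) & 1" is nonzero exactly when bit k of x is set
theorem tb_band_one (a : Int) (k : Nat) :
    (PySem.Int.band (a >>> k) 1 ≠ 0) ↔ a.testBit k = true := by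
  have h1 : pyShl1 0 = 1 := by decide
  have h := tb_band_pow (a >>> k) 0
  rw [h1] at h
  rw [h, tb_sr]

-- bit j of "1 << k"
theorem tb_one_shiftLeft (k j : Nat) :
    (pyShl1 k).testBit j = decide (k = j) := by
  have hpow : pyShl1 k = ((2 ^ k : Nat) : Int) := by
    rw [pyShl1, Int.shiftLeft_eq]; push_cast; ring
  rw [hpow]
  have h : (((2 ^ k : Nat) : Int)).testBit j = (2 ^ k : Nat).testBit j := rfl
  rw [h, Nat.testBit_two_pow]

-- flipping two masks commutes
theorem pv_bxor_right_comm (a u v : Int) :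
    PySem.Int.bxor (PySem.Int.bxor a u) v = PySem.Int.bxor (PySem.Int.bxor a v) u :=
  pv_int_ext (fun k => by
    simp only [tb_bxor]
    cases a.testBit k <;> cases u.testBit k <;> cases v.testBit k <;> rfl)

-- flipping the same mask twice cancels
theorem pv_bxor_cancel (a m : Int) :
    PySem.Int.bxor (PySem.Int.bxor a m) m = a :=
  pv_int_ext (fun k => by
    simp only [tb_bxor]
    cases a.testBit k <;> cases m.testBit k <;> rfl)

-- the node after flipping bit b (proof-side names for the shared step of both programs)
def pvStep (n b : Int) : Int := PySem.Int.bxor n (pyShl1 b.toNat)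

-- the list of nodes visited while flipping the bits of L in order, starting from n
def pvScan : Int → List Int → List Int
  | _, [] => []
  | n, b :: L => pvStep n b :: pvScan (pvStep n b) L

-- the final node after flipping all bits of L
def pvX (n : Int) (L : List Int) : Int := L.foldl pvStep n

theorem pvX_cons (n b : Int) (L : List Int) : pvX n (b :: L) = pvX (pvStep n b) L := rfl

-- the (path, node) loop shared by both programs is scan + fold
theorem pv_foldl_flip (L : List Int) (acc : List Int) (n : Int) :
    L.foldl (fun (st : List Int × Int) b =>
        (st.1 ++ [PySem.Int.bxor st.2 (pyShl1 b.toNat)], PySem.Int.bxor st.2 (pyShl1 b.toNat)))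
      (acc, n) = (acc ++ pvScan n L, pvX n L) := by
  induction L generalizing acc n with
  | nil => simp [pvScan, pvX]
  | cons b L ih =>
    simp only [List.foldl_cons, pvScan, pvX_cons]
    rw [ih]
    simp [pvStep]

theorem pvScan_append (n : Int) (L1 L2 : List Int) :
    pvScan n (L1 ++ L2) = pvScan n L1 ++ pvScan (pvX n L1) L2 := by
  induction L1 generalizing n with
  | nil => simp [pvScan, pvX]
  | cons b L ih => simp [pvScan, pvX_cons, ih]

theorem pvScan_bxor (m n : Int) (L : List Int) :
    pvScan (PySem.Int.bxor n m) L = (pvScan n L).map (fun x => PySem.Int.bxor x m) := by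
  induction L generalizing n with
  | nil => simp [pvScan]
  | cons b L ih =>
    have hstep : pvStep (PySem.Int.bxor n m) b = PySem.Int.bxor (pvStep n b) m := by
      simp only [pvStep]; exact pv_bxor_right_comm n m (pyShl1 b.toNat)
    simp [pvScan, hstep, ih]

theorem pvX_bxor (m n : Int) (L : List Int) :
    pvX (PySem.Int.bxor n m) L = PySem.Int.bxor (pvX n L) m := by
  induction L generalizing n with
  | nil => rfl
  | cons b L ih =>
    have hstep : pvStep (PySem.Int.bxor n m) b = PySem.Int.bxor (pvStep n b) m := by
      simp only [pvStep]; exact pv_bxor_right_comm n m (pyShl1 b.toNat)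
    simp [pvX_cons, hstep, ih]

theorem pvScan_length (n : Int) (L : List Int) : (pvScan n L).length = L.length := by
  induction L generalizing n with
  | nil => rfl
  | cons b L ih => simp [pvScan, ih]

-- the prefix table ends in the final node
theorem pv_cons_scan (L : List Int) (n : Int) :
    n :: pvScan n L = (n :: pvScan n L).take L.length ++ [pvX n L] := by
  induction L generalizing n with
  | nil => simp [pvScan, pvX]
  | cons b L ih =>
    simp only [pvScan, pvX_cons, List.length_cons, List.take_succ_cons]
    rw [List.cons_append, ← ih (pvStep n b)]

-- bits not touched by the loop keep their value
theorem pv_tb_X (k : Nat) (L : List Int) (n : Int) (h : ∀ b ∈ L, b.toNat ≠ k) :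
    (pvX n L).testBit k = n.testBit k := by
  induction L generalizing n with
  | nil => rfl
  | cons b L ih =>
    rw [pvX_cons, ih _ (fun x hx => h x (List.mem_cons_of_mem b hx))]
    simp [pvStep, tb_bxor, tb_one_shiftLeft, h b List.mem_cons_self]

-- the index dict of B lists (b, i) for the i-th differing bit b
theorem pv_idx_items (L : List Int) (h : L.Nodup) :
    ((PySem.List.enumerate L 0).foldl (fun d (p : Int × Int) => d.insert p.2 p.1)
        PySem.Dict.empty).items
      = (PySem.List.enumerate L 0).map (fun p => (p.2, p.1)) := by
  have := PySem.Dict.items_foldl_insert_fresh (l := PySem.List.enumerate L 0)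
      (k := fun p => p.2) (v := fun p => p.1) (d := (PySem.Dict.empty : PySem.Dict Int Int))
      (by intro a _; simp) (by rw [PySem.List.map_snd_enumerate]; exact h)
  simpa using this

theorem pv_idx_keys (L : List Int) (h : L.Nodup) :
    ((PySem.List.enumerate L 0).foldl (fun d (p : Int × Int) => d.insert p.2 p.1)
        PySem.Dict.empty).keys = L := by
  simp only [PySem.Dict.keys, pv_idx_items L h, List.map_map]
  have : ((fun p : Int × Int => p.1) ∘ fun p : Int × Int => (p.2, p.1)) = (fun p : Int × Int => p.2) := rfl
  rw [this, PySem.List.map_snd_enumerate]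

theorem pv_main (s t dim : Int) : find_independent_paths s t dim = find_independent_paths_alt s t dim := by
  simp only [find_independent_paths, find_independent_paths_alt]
  rw [PySem.List.foldl_append_singleton_eq_map, PySem.List.foldl_append_singleton_eq_map]
  simp only [List.nil_append]
  apply List.map_congr_left
  intro p hp
  obtain ⟨hp0, hpd⟩ := PySem.List.mem_pyRange_one.mp hp
  set q : Int → Bool := fun b => decide (PySem.Int.band ((PySem.Int.bxor s t) >>> (b.toNat : Int)) 1 ≠ 0) with hq
  set L : List Int := (PySem.List.pyRange 0 dim 1).filter q with hLdef
  have hnodup : L.Nodup := List.Nodup.filter q (PySem.List.nodup_pyRange_one 0 dim)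
  have hLsub : ∀ b ∈ L, 0 ≤ b ∧ b < dim := by
    intro b hb
    exact PySem.List.mem_pyRange_one.mp (List.mem_of_mem_filter hb)
  -- A's inner scan over range(dimension) is the guarded fold over the differing bits
  have hA : (PySem.List.pyRange 0 dim 1).foldl (fun (st : List Int × Int) bit_pos =>
        if bit_pos ≠ p ∧ PySem.Int.band (PySem.Int.bxor (PySem.Int.bxor s (pyShl1 p.toNat)) t)
            (pyShl1 bit_pos.toNat) ≠ 0 then
          (st.1 ++ [PySem.Int.bxor st.2 (pyShl1 bit_pos.toNat)],
           PySem.Int.bxor st.2 (pyShl1 bit_pos.toNat))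
        else st)
      ([s] ++ [PySem.Int.bxor s (pyShl1 p.toNat)], PySem.Int.bxor s (pyShl1 p.toNat))
      = L.foldl (fun (st : List Int × Int) b =>
          if b ≠ p then
            (st.1 ++ [PySem.Int.bxor st.2 (pyShl1 b.toNat)], PySem.Int.bxor st.2 (pyShl1 b.toNat))
          else st)
        ([s] ++ [PySem.Int.bxor s (pyShl1 p.toNat)], PySem.Int.bxor s (pyShl1 p.toNat)) := by
    rw [hLdef, List.foldl_filter]
    apply PySem.List.foldl_congr_mem
    intro acc b hb
    obtain ⟨hb0, hbd⟩ := PySem.List.mem_pyRange_one.mp hb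
    by_cases hbp : b = p
    · subst hbp; simp
    · have hbn : p.toNat ≠ b.toNat := by omega
      have hcond : (PySem.Int.band (PySem.Int.bxor (PySem.Int.bxor s (pyShl1 p.toNat)) t)
            (pyShl1 b.toNat) ≠ 0) ↔ (PySem.Int.band ((PySem.Int.bxor s t) >>> (b.toNat : Int)) 1 ≠ 0) := by
        rw [Int.shiftRight_natCast_right]
        rw [tb_band_pow, tb_band_one, tb_bxor, tb_bxor, tb_bxor, tb_one_shiftLeft]
        simp [hbn]
      by_cases hX : PySem.Int.band ((PySem.Int.bxor s t) >>> (b.toNat : Int)) 1 ≠ 0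
      · rw [if_pos ⟨hbp, hcond.mpr hX⟩]
        have hqb : q b = true := by rw [hq]; simpa using hX
        rw [hqb, if_pos rfl, if_pos hbp]
      · rw [if_neg (fun h => hX (hcond.mp h.2))]
        have hqb : q b = false := by rw [hq]; simpa using hX
        rw [hqb, if_neg (by simp)]
  
  
  rw [hA]
  have hGF : ∀ (M : List Int) (acc : List Int × Int), (∀ b ∈ M, b ≠ p) →
      M.foldl (fun (st : List Int × Int) b =>
        if b ≠ p then
          (st.1 ++ [PySem.Int.bxor st.2 (pyShl1 b.toNat)], PySem.Int.bxor st.2 (pyShl1 b.toNat))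
        else st) acc
      = M.foldl (fun (st : List Int × Int) b =>
          (st.1 ++ [PySem.Int.bxor st.2 (pyShl1 b.toNat)], PySem.Int.bxor st.2 (pyShl1 b.toNat))) acc := by
    intro M acc hM
    apply PySem.List.foldl_congr_mem
    intro a b hb; rw [if_pos (hM b hb)]
  have hLtb : ∀ M : List Int, (∀ b ∈ M, b ∈ L ∧ b ≠ p) → ∀ n : Int,
      (pvX n M).testBit p.toNat = n.testBit p.toNat := by
    intro M hM n
    apply pv_tb_X
    intro b hb
    have h1 := hLsub b (hM b hb).1
    have h2 := (hM b hb).2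
    omega
  have hkeys := pv_idx_keys L hnodup
  have hcont : ((PySem.List.enumerate L 0).foldl (fun d (r : Int × Int) => d.insert r.2 r.1)
      PySem.Dict.empty).contains p = decide (p ∈ L) := by
    rw [PySem.Dict.contains_eq_decide_mem_keys, hkeys]
  have him_tb : (PySem.Int.bxor s (pyShl1 p.toNat)).testBit p.toNat = !s.testBit p.toNat := by
    rw [tb_bxor, tb_one_shiftLeft]
    simp
  by_cases hmem : p ∈ L
  · -- p is one of the differing bits
    obtain ⟨k, hk, hLk⟩ := List.mem_iff_getElem.mp hmem
    have hget : ((PySem.List.enumerate L 0).foldl (fun d (r : Int × Int) => d.insert r.2 r.1)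
        PySem.Dict.empty).get? p = some ((0:Int) + (k:Int)) := by
      apply PySem.Dict.get?_of_mem_items
      · rw [pv_idx_items L hnodup]
        exact List.mem_map.mpr ⟨((0:Int) + (k:Int), p),
          (PySem.List.mem_enumerate_iff _ _ _).mpr ⟨k, hk, by rw [hLk]⟩, rfl⟩
      · rw [hkeys]; exact hnodup
    have hdec : L = L.take k ++ p :: L.drop (k+1) := by
      conv_lhs => rw [← List.take_append_drop k L]
      rw [List.drop_eq_getElem_cons hk, hLk]
    have hnd : (L.take k).Nodup ∧ (p :: L.drop (k+1)).Nodup ∧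
        ∀ a ∈ L.take k, ∀ b ∈ p :: L.drop (k+1), a ≠ b := by
      rw [← List.nodup_append, ← hdec]; exact hnodup
    have hnotin1 : p ∉ L.take k := fun hx => hnd.2.2 p hx p List.mem_cons_self rfl
    have hnotin2 : p ∉ L.drop (k+1) := (List.nodup_cons.mp hnd.2.1).1
    have hsub1 : ∀ b ∈ L.take k, b ∈ L ∧ b ≠ p := by
      intro b hb
      exact ⟨by rw [hdec]; exact List.mem_append_left _ hb, fun e => hnotin1 (e ▸ hb)⟩
    have hsub2 : ∀ b ∈ L.drop (k+1), b ∈ L ∧ b ≠ p := by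
      intro b hb
      exact ⟨by rw [hdec]; exact List.mem_append_right _ (List.mem_cons_of_mem _ hb), fun e => hnotin2 (e ▸ hb)⟩
    have hqp : (PySem.Int.bxor s t).testBit p.toNat = true := by
      have h0 := (List.mem_filter.mp (hLdef ▸ hmem)).2
      rw [hq] at h0
      simp only [decide_eq_true_eq] at h0
      rw [Int.shiftRight_natCast_right] at h0
      exact (tb_band_one _ _).mp h0
    -- A's fold along the decomposition
    have hstA : L.foldl (fun (st : List Int × Int) b =>
          if b ≠ p then
            (st.1 ++ [PySem.Int.bxor st.2 (pyShl1 b.toNat)], PySem.Int.bxor st.2 (pyShl1 b.toNat))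
          else st)
        ([s] ++ [PySem.Int.bxor s (pyShl1 p.toNat)], PySem.Int.bxor s (pyShl1 p.toNat))
        = ([s] ++ [PySem.Int.bxor s (pyShl1 p.toNat)]
            ++ pvScan (PySem.Int.bxor s (pyShl1 p.toNat)) (L.take k)
            ++ pvScan (pvX (PySem.Int.bxor s (pyShl1 p.toNat)) (L.take k)) (L.drop (k+1)),
           pvX (pvX (PySem.Int.bxor s (pyShl1 p.toNat)) (L.take k)) (L.drop (k+1))) := by
      conv_lhs => rw [hdec]
      rw [List.foldl_append, hGF _ _ (fun b hb => (hsub1 b hb).2), pv_foldl_flip, List.foldl_cons,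
        if_neg (fun h => h rfl), hGF _ _ (fun b hb => (hsub2 b hb).2), pv_foldl_flip]
    rw [hstA]
    -- A's flip-back test is false here
    have hC : ¬ (PySem.Int.band (PySem.Int.bxor
        (pvX (pvX (PySem.Int.bxor s (pyShl1 p.toNat)) (L.take k)) (L.drop (k+1))) t)
        (pyShl1 p.toNat) ≠ 0) := by
      intro h
      have h1 := (tb_band_pow _ _).mp h
      rw [tb_bxor, hLtb _ hsub2, hLtb _ hsub1, him_tb] at h1
      rw [tb_bxor] at hqp
      cases hs : s.testBit p.toNat <;> cases ht : t.testBit p.toNat <;>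
        simp [hs, ht] at h1 hqp
    rw [if_neg hC, ite_self]
    -- B's branch
    rw [hcont, if_pos (by simpa using hmem), hget]
    simp only [Option.getD_some, pv_foldl_flip]
    have hcast : (0:Int) + (k:Int) = ((k:Nat):Int) := by simp
    have hcast1 : ((k:Nat):Int) + 1 = (((k+1):Nat):Int) := by push_cast; ring
    rw [hcast, PySem.List.slice_to_natCast, hcast1, PySem.List.slice_from_natCast]
    -- both sides as segments of the shared prefix table
    have hlen1 : (pvScan s (L.take k)).length = k := by
      rw [pvScan_length, List.length_take]; omega
    have hlen2 : (L.take k).length = k := by rw [List.length_take]; omega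
    simp only [List.singleton_append]
    have hbase : s :: pvScan s L = (s :: pvScan s (L.take k)) ++
        pvStep (pvX s (L.take k)) p :: pvScan (pvStep (pvX s (L.take k)) p) (L.drop (k+1)) := by
      conv_lhs => rw [hdec]
      rw [pvScan_append]; rfl
    rw [hbase, List.take_append, List.drop_append]
    have hlenP : (s :: pvScan s (L.take k)).length = k + 1 := by simp [hlen1]
    rw [hlenP, show k - (k+1) = 0 from by omega, show (k+1) - (k+1) = 0 from by omega,
      show (s :: pvScan s (L.take k)).drop (k+1) = [] from
        List.drop_of_length_le (le_of_eq hlenP)]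
    simp only [List.take_zero, List.append_nil, List.drop_zero, List.nil_append]
    -- rewrite A's segments through the table
    rw [pvScan_bxor (pyShl1 p.toNat) s (L.take k)]
    have hxi : pvX (PySem.Int.bxor s (pyShl1 p.toNat)) (L.take k)
        = pvStep (pvX s (L.take k)) p := by
      rw [pvX_bxor]; rfl
    rw [hxi]
    have hP' : PySem.Int.bxor s (pyShl1 p.toNat) ::
        List.map (fun x => PySem.Int.bxor x (pyShl1 p.toNat)) (pvScan s (L.take k))
        = List.map (fun x => PySem.Int.bxor x (pyShl1 p.toNat)) ((s :: pvScan s (L.take k)).take k)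
          ++ [pvStep (pvX s (L.take k)) p] := by
      conv_lhs => rw [show (PySem.Int.bxor s (pyShl1 p.toNat) ::
          List.map (fun x => PySem.Int.bxor x (pyShl1 p.toNat)) (pvScan s (L.take k)))
          = List.map (fun x => PySem.Int.bxor x (pyShl1 p.toNat)) (s :: pvScan s (L.take k)) from rfl,
        pv_cons_scan (L.take k) s]
      rw [hlen2, List.map_append]
      simp [pvStep]
    simp only [List.cons_append, List.nil_append]
    conv_lhs => rw [← List.cons_append]
    rw [hP', List.append_assoc]
    rfl
  · -- p is not a differing bit
    have hqp : (PySem.Int.bxor s t).testBit p.toNat = false := by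
      by_contra h
      have h' : q p = true := by
        rw [hq]
        simp only [decide_eq_true_eq]
        rw [Int.shiftRight_natCast_right, tb_band_one]
        simpa using h
      exact hmem (hLdef ▸ List.mem_filter.mpr ⟨hp, h'⟩)
    have hstA : L.foldl (fun (st : List Int × Int) b =>
          if b ≠ p then
            (st.1 ++ [PySem.Int.bxor st.2 (pyShl1 b.toNat)], PySem.Int.bxor st.2 (pyShl1 b.toNat))
          else st)
        ([s] ++ [PySem.Int.bxor s (pyShl1 p.toNat)], PySem.Int.bxor s (pyShl1 p.toNat))
        = ([s] ++ [PySem.Int.bxor s (pyShl1 p.toNat)]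
            ++ pvScan (PySem.Int.bxor s (pyShl1 p.toNat)) L,
           pvX (PySem.Int.bxor s (pyShl1 p.toNat)) L) := by
      rw [hGF _ _ (fun b hb => fun e => hmem (e ▸ hb)), pv_foldl_flip]
    rw [hstA]
    have hC : (PySem.Int.bxor (pvX (PySem.Int.bxor s (pyShl1 p.toNat)) L) t).testBit p.toNat = true := by
      rw [tb_bxor, hLtb L (fun b hb => ⟨hb, fun e => hmem (e ▸ hb)⟩), him_tb]
      rw [tb_bxor] at hqp
      cases hs : s.testBit p.toNat <;> cases ht : t.testBit p.toNat <;>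
        simp [hs, ht] at hqp ⊢
    have hC' : PySem.Int.band (PySem.Int.bxor (pvX (PySem.Int.bxor s (pyShl1 p.toNat)) L) t)
        (pyShl1 p.toNat) ≠ 0 := (tb_band_pow _ _).mpr hC
    have hne : pvX (PySem.Int.bxor s (pyShl1 p.toNat)) L ≠ t := by
      intro e
      rw [e] at hC
      rw [tb_bxor] at hC
      simp at hC
    rw [if_pos hne, if_pos hC']
    rw [hcont, if_neg (by simpa using hmem)]
    simp only [pv_foldl_flip]
    rw [pvX_bxor, pv_bxor_cancel]
    rw [pvScan_bxor (pyShl1 p.toNat) s L]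
    simp

-- ===== VERDICT (by name: the statement is the Claim_ definition above) =====
theorem find_independent_paths_spec : Claim_equal_find_independent_paths := by
  intro source destination dimension _
  unfold Spec_find_independent_paths
  exact pv_main source destination dimension
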